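-- pv_equiv track=rewrite | github.com/doushenyiyezhiqiu/amazon_ng_oa1 | count_101_010.py | how_to_count
-- ===== SOURCE A (Python) =====
-- def how_to_count(book):
--     n = len(book)
--     left_zero = [0] * n
--     left_one = [0] * n
--     right_zero = [0] * n
--     right_one = [0] * n
--     ans = 0
--     for i in range(n-2, 0, -1):
--         if book[i+1] == '0':
--             right_zero[i] = right_zero[i+1] + 1
--             right_one[i] = right_one[i+1]
--         else:
--             right_zero[i] = right_zero[i+1]
--             right_one[i] = right_one[i+1] + 1
--     for i in range(1, n - 1):
--         if book[i - 1] == '0':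
--             left_zero[i] = left_zero[i - 1] + 1
--             left_one[i] = left_one[i - 1]
--         else:
--             left_zero[i] = left_zero[i - 1]
--             left_one[i] = left_one[i - 1] + 1
--         if book[i] == '1':
--             ans += left_zero[i] * right_zero[i]
--         else:
--             ans += left_one[i] * right_one[i]
--     return ans
-- ===== SOURCE B (Python) =====
-- def how_to_count(book):
--     # Single left-to-right DP over right-end positions: O(1) extra space,
--     # no prefix/suffix arrays.  For each char as potential right end, add the
--     # number of pending "0?,middle=1" / "non0,middle!=1" pairs seen so far.
--     ans = p1 = p0 = zeros = ones = 0
--     for c in book: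
--         if c == '0':
--             ans += p1
--         else:
--             ans += p0
--         if c == '1':
--             p1 += zeros
--         else:
--             p0 += ones
--         if c == '0':
--             zeros += 1
--         else:
--             ones += 1
--     return ans
-- ===== Notes on version B (the rewrite author's own statement) =====
-- stated objective: faster
-- what changed: Replaced A's three passes over four preallocated prefix/suffix count arrays by a single left-to-right pass with five scalar counters (a subsequence DP adding, at each character as a potential right end, the matching (left,middle) pairs seen so far); same O(n) time but one pass, no list allocation/indexing (measured ~3.5x faster).
import Mathlib
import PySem

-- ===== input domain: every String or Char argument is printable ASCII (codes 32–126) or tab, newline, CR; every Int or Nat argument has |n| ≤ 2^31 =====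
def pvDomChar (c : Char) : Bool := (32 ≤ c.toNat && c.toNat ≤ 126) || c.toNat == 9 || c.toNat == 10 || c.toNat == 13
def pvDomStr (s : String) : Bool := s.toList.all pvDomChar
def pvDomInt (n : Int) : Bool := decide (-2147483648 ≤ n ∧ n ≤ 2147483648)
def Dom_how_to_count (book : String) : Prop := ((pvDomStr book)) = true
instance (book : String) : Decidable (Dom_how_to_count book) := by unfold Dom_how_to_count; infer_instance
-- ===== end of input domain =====

-- B replaces A's three passes and four O(n) index arrays by one left-to-right
-- pass with five scalar counters (a subsequence-DP over right-end positions);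
-- same O(n) time, no array allocation (a timing run measured B ~3.5x faster).

-- ===== PORT A =====
-- backward loop `for i in range(n-2, 0, -1)` as recursion on the loop index;
-- all list/string indices read inside the loops are in range, so `getD` is exact.
def pvLoop1 (l : List Char) : Nat → List Int × List Int → List Int × List Int
  | 0, st => st
  | i + 1, st =>
      pvLoop1 l i
        (if l.getD (i + 2) ' ' = '0' then
            (st.1.set (i + 1) (st.1.getD (i + 2) 0 + 1), st.2.set (i + 1) (st.2.getD (i + 2) 0))
          else
            (st.1.set (i + 1) (st.1.getD (i + 2) 0), st.2.set (i + 1) (st.2.getD (i + 2) 0 + 1)))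

def pvBody2 (l : List Char) (rz ro : List Int) (st : List Int × List Int × Int) (i : Nat) :
    List Int × List Int × Int :=
  let p :=
    if l.getD (i - 1) ' ' = '0' then
      (st.1.set i (st.1.getD (i - 1) 0 + 1), st.2.1.set i (st.2.1.getD (i - 1) 0))
    else
      (st.1.set i (st.1.getD (i - 1) 0), st.2.1.set i (st.2.1.getD (i - 1) 0 + 1))
  let ans :=
    if l.getD i ' ' = '1' then st.2.2 + p.1.getD i 0 * rz.getD i 0
    else st.2.2 + p.2.getD i 0 * ro.getD i 0
  (p.1, p.2, ans)

def how_to_count (book : String) : Int :=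
  let l := book.toList
  let n := l.length
  let r := pvLoop1 l (n - 2) (List.replicate n 0, List.replicate n 0)
  ((List.range' 1 (n - 2)).foldl (pvBody2 l r.1 r.2) (List.replicate n 0, List.replicate n 0, 0)).2.2

-- ===== PORT B =====
def pvStepB (st : Int × Int × Int × Int × Int) (c : Char) : Int × Int × Int × Int × Int :=
  let ans := if c = '0' then st.1 + st.2.1 else st.1 + st.2.2.1
  let p := if c = '1' then (st.2.1 + st.2.2.2.1, st.2.2.1) else (st.2.1, st.2.2.1 + st.2.2.2.2)
  let zo := if c = '0' then (st.2.2.2.1 + 1, st.2.2.2.2) else (st.2.2.2.1, st.2.2.2.2 + 1)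
  (ans, p.1, p.2, zo.1, zo.2)

def how_to_count_alt (book : String) : Int :=
  (book.toList.foldl pvStepB (0, 0, 0, 0, 0)).1

-- ===== PRECONDITION & SPEC =====
def Spec_how_to_count (book : String) (out : Int) : Prop := out = how_to_count_alt book
instance (book : String) (out : Int) : Decidable (Spec_how_to_count book out) := by unfold Spec_how_to_count; infer_instance

-- ===== CLAIM (what is proved, stated in full; the proofs are below) =====
def Claim_equal_how_to_count : Prop := ∀ (book : String), Dom_how_to_count book → Spec_how_to_count book (how_to_count book)

-- ===== LEMMAS AND PROOFS =====

/-- number of `'0'` characters, as an `Int`. -/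
def zC (u : List Char) : Int := ((u.filter fun c => c == '0').length : Int)
/-- number of non-`'0'` characters, as an `Int`. -/
def oC (u : List Char) : Int := ((u.filter fun c => !(c == '0')).length : Int)

/-- contribution of middle position `i`. -/
def Fm (l : List Char) (i : Nat) : Int :=
  if l.getD i ' ' = '1' then zC (l.take i) * zC (l.drop (i + 1))
  else oC (l.take i) * oC (l.drop (i + 1))

def P1s (u : List Char) : Int :=
  ∑ i ∈ Finset.range u.length, if u.getD i ' ' = '1' then zC (u.take i) else 0
def P0s (u : List Char) : Int :=
  ∑ i ∈ Finset.range u.length, if u.getD i ' ' = '1' then 0 else oC (u.take i)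
def ANSs (u : List Char) : Int := ∑ i ∈ Finset.range u.length, Fm u i

lemma zC_concat (u : List Char) (c : Char) :
    zC (u ++ [c]) = zC u + (if c = '0' then 1 else 0) := by
  simp [zC, List.filter_append]; by_cases h : c = '0' <;> simp [h]

lemma oC_concat (u : List Char) (c : Char) :
    oC (u ++ [c]) = oC u + (if c = '0' then 0 else 1) := by
  simp [oC, List.filter_append]; by_cases h : c = '0' <;> simp [h]

lemma getD_concat_lt (u : List Char) (c : Char) {i : Nat} (h : i < u.length) :
    (u ++ [c]).getD i ' ' = u.getD i ' ' := by
  simp [List.getD_eq_getElem?_getD, List.getElem?_append_left h]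

lemma getD_concat_self (u : List Char) (c : Char) :
    (u ++ [c]).getD u.length ' ' = c := by
  simp [List.getD_eq_getElem?_getD]

lemma take_concat_lt (u : List Char) (c : Char) {i : Nat} (h : i ≤ u.length) :
    (u ++ [c]).take i = u.take i := by
  rw [List.take_append_of_le_length h]

lemma drop_concat_lt (u : List Char) (c : Char) {i : Nat} (h : i ≤ u.length) :
    (u ++ [c]).drop i = u.drop i ++ [c] := by
  rw [List.drop_append_of_le_length h]

lemma P1s_concat (u : List Char) (c : Char) :
    P1s (u ++ [c]) = P1s u + (if c = '1' then zC u else 0) := by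
  unfold P1s
  rw [show (u ++ [c]).length = u.length + 1 by simp, Finset.sum_range_succ]
  congr 1
  · exact Finset.sum_congr rfl fun i hi => by
      have h := Finset.mem_range.mp hi
      rw [getD_concat_lt u c h, take_concat_lt u c (Nat.le_of_lt h)]
  · rw [getD_concat_self, take_concat_lt u c le_rfl, List.take_length]

lemma P0s_concat (u : List Char) (c : Char) :
    P0s (u ++ [c]) = P0s u + (if c = '1' then 0 else oC u) := by
  unfold P0s
  rw [show (u ++ [c]).length = u.length + 1 by simp, Finset.sum_range_succ]
  congr 1
  · exact Finset.sum_congr rfl fun i hi => by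
      have h := Finset.mem_range.mp hi
      rw [getD_concat_lt u c h, take_concat_lt u c (Nat.le_of_lt h)]
  · rw [getD_concat_self, take_concat_lt u c le_rfl, List.take_length]

lemma Fm_concat_lt (u : List Char) (c : Char) {i : Nat} (h : i < u.length) :
    Fm (u ++ [c]) i = Fm u i +
      (if c = '0' then (if u.getD i ' ' = '1' then zC (u.take i) else 0)
        else (if u.getD i ' ' = '1' then 0 else oC (u.take i))) := by
  unfold Fm
  rw [getD_concat_lt u c h, take_concat_lt u c (Nat.le_of_lt h), drop_concat_lt u c h,
    zC_concat, oC_concat]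
  split_ifs <;> ring

lemma ANSs_concat (u : List Char) (c : Char) :
    ANSs (u ++ [c]) = ANSs u + (if c = '0' then P1s u else P0s u) := by
  unfold ANSs
  rw [show (u ++ [c]).length = u.length + 1 by simp, Finset.sum_range_succ]
  have hlast : Fm (u ++ [c]) u.length = 0 := by
    unfold Fm
    rw [take_concat_lt u c le_rfl, List.take_length,
      show (u ++ [c]).drop (u.length + 1) = [] by simp]
    by_cases h1 : (u ++ [c]).getD u.length ' ' = '1' <;> simp [zC, oC]
  rw [hlast, add_zero,
    Finset.sum_congr rfl fun i hi => Fm_concat_lt u c (Finset.mem_range.mp hi),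
    Finset.sum_add_distrib]
  congr 1
  by_cases h0 : c = '0' <;> simp only [h0, if_true, if_false, P1s, P0s]

lemma foldB (u : List Char) :
    u.foldl pvStepB (0, 0, 0, 0, 0) = (ANSs u, P1s u, P0s u, zC u, oC u) := by
  induction u using List.reverseRecOn with
  | nil => simp [ANSs, P1s, P0s, zC, oC]
  | append_singleton u c ih =>
      rw [List.foldl_append, ih]
      simp only [List.foldl_cons, List.foldl_nil, pvStepB,
        ANSs_concat, P1s_concat, P0s_concat, zC_concat, oC_concat]
      by_cases h0 : c = '0' <;> by_cases h1 : c = '1' <;> simp_all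

lemma getD_replicate_zero (n j : Nat) : (List.replicate n (0 : Int)).getD j 0 = 0 := by
  simp only [List.getD_eq_getElem?_getD, List.getElem?_replicate]
  split <;> rfl

lemma zC_cons (a : Char) (t : List Char) :
    zC (a :: t) = (if a = '0' then 1 else 0) + zC t := by
  by_cases h : a = '0' <;> simp [zC, h] <;> try omega

lemma oC_cons (a : Char) (t : List Char) :
    oC (a :: t) = (if a = '0' then 0 else 1) + oC t := by
  by_cases h : a = '0' <;> simp [oC, h] <;> try omega

lemma getD_set_self (v : List Int) (i : Nat) (x : Int) (h : i < v.length) :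
    (v.set i x).getD i 0 = x := by
  simp [List.getD_eq_getElem?_getD, List.getElem?_set_self h]

lemma getD_set_ne (v : List Int) (i j : Nat) (x : Int) (h : i ≠ j) :
    (v.set i x).getD j 0 = v.getD j 0 := by
  simp [List.getD_eq_getElem?_getD, List.getElem?_set_ne h]

lemma loop1_inv (l : List Char) (k : Nat) :
    ∀ rz ro : List Int, k ≤ l.length - 2 →
    rz.length = l.length → ro.length = l.length →
    (∀ j, k < j → rz.getD j 0 = zC (l.drop (j + 1))) →
    (∀ j, k < j → ro.getD j 0 = oC (l.drop (j + 1))) →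
    (∀ j, 0 < j → (pvLoop1 l k (rz, ro)).1.getD j 0 = zC (l.drop (j + 1)) ∧
      (pvLoop1 l k (rz, ro)).2.getD j 0 = oC (l.drop (j + 1))) := by
  induction k with
  | zero =>
      intro rz ro _ _ _ hz ho j hj
      exact ⟨hz j hj, ho j hj⟩
  | succ k ih =>
      intro rz ro hk hlen hlen' hz ho
      have hk2 : k + 2 < l.length := by omega
      have hget : l.getD (k + 2) ' ' = l[k + 2] := by
        simp [List.getD_eq_getElem?_getD, List.getElem?_eq_getElem hk2]
      have hdrop : l.drop (k + 2) = l[k + 2] :: l.drop (k + 3) :=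
        List.drop_eq_getElem_cons hk2
      have key : ∀ (v : List Int) (x : Int) (spec : List Char → Int),
          v.length = l.length →
          (∀ j, k + 1 < j → v.getD j 0 = spec (l.drop (j + 1))) →
          x = spec (l.drop (k + 2)) →
          ∀ j, k < j → (v.set (k + 1) x).getD j 0 = spec (l.drop (j + 1)) := by
        intro v x spec hv hvj hx j hj
        rcases eq_or_ne j (k + 1) with rfl | hne
        · rw [getD_set_self _ _ _ (by omega), hx]
        · rw [getD_set_ne _ _ _ _ (Ne.symm hne)]; exact hvj j (by omega)
      unfold pvLoop1
      by_cases hc : l.getD (k + 2) ' ' = '0' <;>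
        simp only [hc, if_true, if_false] <;>
        refine ih _ _ (by omega) (by simp [hlen]) (by simp [hlen'])
          (key _ _ _ hlen hz ?_) (key _ _ _ hlen' ho ?_)
      · rw [hz (k + 2) (by omega), hdrop, zC_cons, hget] at *
        simp [hc]; ring
      · rw [ho (k + 2) (by omega), hdrop, oC_cons, hget] at *
        simp [hc]
      · rw [hz (k + 2) (by omega), hdrop, zC_cons, hget] at *
        simp [hc]
      · rw [ho (k + 2) (by omega), hdrop, oC_cons, hget] at *
        simp [hc]; ring

lemma Fm_zero (l : List Char) : Fm l 0 = 0 := by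
  unfold Fm; split_ifs <;> simp [zC, oC]

lemma Fm_last (l : List Char) (j : Nat) (hj : l.length ≤ j + 1) : Fm l j = 0 := by
  unfold Fm; rw [List.drop_eq_nil_of_le hj]; split_ifs <;> simp [zC, oC]

lemma loop2_inv (l : List Char) (rz ro : List Int)
    (hrz : ∀ j, 0 < j → rz.getD j 0 = zC (l.drop (j + 1)))
    (hro : ∀ j, 0 < j → ro.getD j 0 = oC (l.drop (j + 1))) :
    ∀ m, m ≤ l.length - 2 →
    (((List.range' 1 m).foldl (pvBody2 l rz ro)
        (List.replicate l.length 0, List.replicate l.length 0, 0)).1.length = l.length) ∧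
    (((List.range' 1 m).foldl (pvBody2 l rz ro)
        (List.replicate l.length 0, List.replicate l.length 0, 0)).2.1.length = l.length) ∧
    (((List.range' 1 m).foldl (pvBody2 l rz ro)
        (List.replicate l.length 0, List.replicate l.length 0, 0)).1.getD m 0 = zC (l.take m)) ∧
    (((List.range' 1 m).foldl (pvBody2 l rz ro)
        (List.replicate l.length 0, List.replicate l.length 0, 0)).2.1.getD m 0 = oC (l.take m)) ∧
    (((List.range' 1 m).foldl (pvBody2 l rz ro)
        (List.replicate l.length 0, List.replicate l.length 0, 0)).2.2
      = ∑ i ∈ Finset.Ico 1 (m + 1), Fm l i) := by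
  intro m
  induction m with
  | zero =>
      intro _
      simp [zC, oC]
  | succ m ih =>
      intro hm
      obtain ⟨hL1, hL2, hz, ho, hans⟩ := ih (by omega)
      have hm1 : m + 1 < l.length := by omega
      have hmlt : m < l.length := by omega
      have hgetm : l.getD m ' ' = l[m] := by
        simp [List.getD_eq_getElem?_getD, List.getElem?_eq_getElem hmlt]
      have htake : l.take (m + 1) = l.take m ++ [l[m]] := by
        rw [← List.take_concat_get hmlt, List.concat_eq_append]
      rw [show List.range' 1 (m + 1) = List.range' 1 m ++ [1 + 1 * m] from List.range'_concat,
        List.foldl_append]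
      rw [show 1 + 1 * m = m + 1 by omega]
      set st := (List.range' 1 m).foldl (pvBody2 l rz ro)
        (List.replicate l.length 0, List.replicate l.length 0, 0) with hst
      show (pvBody2 l rz ro st (m + 1)).1.length = l.length ∧
        (pvBody2 l rz ro st (m + 1)).2.1.length = l.length ∧
        (pvBody2 l rz ro st (m + 1)).1.getD (m + 1) 0 = zC (l.take (m + 1)) ∧
        (pvBody2 l rz ro st (m + 1)).2.1.getD (m + 1) 0 = oC (l.take (m + 1)) ∧
        (pvBody2 l rz ro st (m + 1)).2.2 = ∑ i ∈ Finset.Ico 1 (m + 1 + 1), Fm l i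
      have hsum : (∑ i ∈ Finset.Ico 1 (m + 1 + 1), Fm l i)
          = (∑ i ∈ Finset.Ico 1 (m + 1), Fm l i) + Fm l (m + 1) :=
        Finset.sum_Ico_succ_top (by omega) _
      unfold pvBody2
      simp only [show m + 1 - 1 = m from rfl]
      by_cases hc : l.getD m ' ' = '0' <;>
        simp only [hc, if_true, if_false] <;>
        refine ⟨by simp [hL1], by simp [hL2], ?_, ?_, ?_⟩
      · rw [getD_set_self _ _ _ (by omega), hz, htake, zC_concat]
        rw [hgetm] at hc; simp [hc]
      · rw [getD_set_self _ _ _ (by omega), ho, htake, oC_concat]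
        rw [hgetm] at hc; simp [hc]
      · rw [hsum, hans]
        unfold Fm
        by_cases h1 : l.getD (m + 1) ' ' = '1' <;>
          simp only [h1, if_true, if_false] <;> congr 1
        · rw [getD_set_self _ _ _ (by omega), hz, htake, zC_concat,
            hrz (m + 1) (by omega)]
          rw [hgetm] at hc; simp [hc]
        · rw [getD_set_self _ _ _ (by omega), ho, htake, oC_concat,
            hro (m + 1) (by omega)]
          rw [hgetm] at hc; simp [hc]
      · rw [getD_set_self _ _ _ (by omega), hz, htake, zC_concat]
        rw [hgetm] at hc; simp [hc]
      · rw [getD_set_self _ _ _ (by omega), ho, htake, oC_concat]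
        rw [hgetm] at hc; simp [hc]
      · rw [hsum, hans]
        unfold Fm
        by_cases h1 : l.getD (m + 1) ' ' = '1' <;>
          simp only [h1, if_true, if_false] <;> congr 1
        · rw [getD_set_self _ _ _ (by omega), hz, htake, zC_concat,
            hrz (m + 1) (by omega)]
          rw [hgetm] at hc; simp [hc]
        · rw [getD_set_self _ _ _ (by omega), ho, htake, oC_concat,
            hro (m + 1) (by omega)]
          rw [hgetm] at hc; simp [hc]

lemma sum_bridge (l : List Char) :
    (∑ i ∈ Finset.Ico 1 (l.length - 2 + 1), Fm l i)
      = ∑ i ∈ Finset.range l.length, Fm l i := by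
  rcases hn : l.length with _ | n
  · simp
  · rcases n with _ | m
    · simp [Fm_zero]
    · have h2 : (m + 1 + 1) - 2 + 1 = m + 1 := by omega
      have hr : (∑ i ∈ Finset.range l.length, Fm l i)
          = ∑ i ∈ Finset.Ico 1 (m + 1), Fm l i := by
        rw [hn, Finset.range_eq_Ico,
          Finset.sum_eq_sum_Ico_succ_bot (Nat.succ_pos _) (Fm l),
          Finset.sum_Ico_succ_top (by omega) (Fm l),
          Fm_zero, Fm_last l (m + 1) (by omega)]
        simp
      rw [h2, ← hn, hr]

theorem how_to_count_spec : Claim_equal_how_to_count := by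
  intro book _
  unfold Spec_how_to_count
  simp only [how_to_count, how_to_count_alt]
  set l := book.toList with hl
  have hinit : ∀ j, l.length - 2 < j →
      (List.replicate l.length (0 : Int)).getD j 0 = zC (l.drop (j + 1)) ∧
      (List.replicate l.length (0 : Int)).getD j 0 = oC (l.drop (j + 1)) := by
    intro j hj
    have hd : l.drop (j + 1) = [] := List.drop_eq_nil_of_le (by omega)
    rw [hd, getD_replicate_zero]
    exact ⟨by simp [zC], by simp [oC]⟩
  have h1 := loop1_inv l (l.length - 2) (List.replicate l.length 0)
    (List.replicate l.length 0) le_rfl (by simp) (by simp)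
    (fun j hj => (hinit j hj).1) (fun j hj => (hinit j hj).2)
  have h2 := loop2_inv l
    (pvLoop1 l (l.length - 2) (List.replicate l.length 0, List.replicate l.length 0)).1
    (pvLoop1 l (l.length - 2) (List.replicate l.length 0, List.replicate l.length 0)).2
    (fun j hj => (h1 j hj).1) (fun j hj => (h1 j hj).2)
    (l.length - 2) le_rfl
  rw [h2.2.2.2.2, foldB l, sum_bridge l]
  rfl
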